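-- pv_equiv track=rewrite | github.com/Ashiq-am/Data-Structures-Algorithm | 1.Python Algorithms/11.Dynamic Programming/4.Intermediate Problems/121.Remove minimum elements from either side such that 2min becomes more than max/Example 1.py | minRemovals
-- ===== SOURCE A (Python) =====
-- def mini(arr, l, h):
--     mn = arr[l]
--     for i in range(l + 1, h + 1):
--         if (mn > arr[i]):
--             mn = arr[i]
--     return mn
--
-- def max(arr, l, h):
--     mx = arr[l]
--     for i in range(l + 1, h + 1):
--         if (mx < arr[i]):
--             mx = arr[i]
--     return mx
--
-- def minRemovals(arr, l, h):
--     # If there is 1 or less elements, return 0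
--     # For a single element, 2*min > max
--     # (Assumption: All elements are positive in arr[])
--     if (l >= h):
--         return 0
--
--     # 1) Find minimum and maximum
--     # in arr[l..h]
--     mn = mini(arr, l, h)
--     mx = max(arr, l, h)
--
--     # If the property is followed,
--     # no removals needed
--     if (2 * mn > mx):
--         return 0
--
--     # Otherwise remove a character from
--     # left end and recur, then remove a
--     # character from right end and recur,
--     # take the minimum of two is returned
--     return (min(minRemovals(arr, l + 1, h),
--                 minRemovals(arr, l, h - 1)) + 1)
-- ===== SOURCE B (Python) =====
-- def minRemovals(arr, l, h):
--     # Longest-valid-window scan: the answer is the window size minus the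
--     # length of the longest contiguous subwindow of arr[l..h] whose elements
--     # satisfy 2*min > max (single elements always count, as in A's base case).
--     if l >= h:
--         return 0
--     best = 1
--     for i in range(l, h + 1):
--         mn = mx = arr[i]
--         for j in range(i + 1, h + 1):
--             a = arr[j]
--             if a < mn:
--                 mn = a
--             if a > mx:
--                 mx = a
--             if 2 * mn > mx:
--                 if j - i + 1 > best:
--                     best = j - i + 1
--             else:
--                 break
--     return (h - l + 1) - best
-- ===== Notes on version B (the rewrite author's own statement) =====
-- stated objective: alternative
-- what changed: Replaces A's two-sided remove-and-recur branching recursion by a single direct scan that finds the longest contiguous subwindow of arr[l..h] satisfying 2*min > max (breaking early, since the property is monotone under window extension) and returns window size minus that length.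
import Mathlib
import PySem

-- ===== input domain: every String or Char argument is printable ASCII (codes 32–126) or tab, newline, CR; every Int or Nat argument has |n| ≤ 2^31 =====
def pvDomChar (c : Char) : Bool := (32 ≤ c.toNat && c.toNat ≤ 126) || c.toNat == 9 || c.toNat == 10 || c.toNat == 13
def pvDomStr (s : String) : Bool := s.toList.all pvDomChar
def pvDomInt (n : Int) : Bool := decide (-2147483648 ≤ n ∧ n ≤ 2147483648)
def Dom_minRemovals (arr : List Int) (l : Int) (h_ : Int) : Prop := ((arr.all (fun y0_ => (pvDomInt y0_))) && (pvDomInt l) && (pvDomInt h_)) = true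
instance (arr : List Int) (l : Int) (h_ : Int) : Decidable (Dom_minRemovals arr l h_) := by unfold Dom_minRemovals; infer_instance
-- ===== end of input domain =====

-- B replaces A's two-sided remove-and-recur recursion by a direct scan for the
-- longest contiguous subwindow satisfying 2*min > max; answer = size - best.

-- ===== PORT A =====
def pyMini (arr : List Int) (l : Int) (h_ : Int) : Int :=
  (PySem.List.pyRange (l + 1) (h_ + 1) 1).foldl
    (fun mn i =>
      if mn > PySem.List.pyGetD arr i 0 then PySem.List.pyGetD arr i 0 else mn)
    (PySem.List.pyGetD arr l 0)

def pyMaxA (arr : List Int) (l : Int) (h_ : Int) : Int :=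
  (PySem.List.pyRange (l + 1) (h_ + 1) 1).foldl
    (fun mx i =>
      if mx < PySem.List.pyGetD arr i 0 then PySem.List.pyGetD arr i 0 else mx)
    (PySem.List.pyGetD arr l 0)

def minRemovals (arr : List Int) (l : Int) (h_ : Int) : Int :=
  if hl : l ≥ h_ then 0
  else
    let mn := pyMini arr l h_
    let mx := pyMaxA arr l h_
    if 2 * mn > mx then 0
    else min (minRemovals arr (l + 1) h_) (minRemovals arr l (h_ - 1)) + 1
termination_by (h_ - l).toNat
decreasing_by all_goals omega

-- ===== PORT B =====
-- the inner `for j` loop of Source B (returns `best` on break / loop end)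
def innerB (arr : List Int) (h_ i j mn mx best : Int) : Int :=
  if hj : j > h_ then best
  else
    let a := PySem.List.pyGetD arr j 0
    let mn' := if a < mn then a else mn
    let mx' := if a > mx then a else mx
    if 2 * mn' > mx' then
      innerB arr h_ i (j + 1) mn' mx'
        (if j - i + 1 > best then j - i + 1 else best)
    else best
termination_by (h_ + 1 - j).toNat
decreasing_by omega

def minRemovals_alt (arr : List Int) (l : Int) (h_ : Int) : Int :=
  if l ≥ h_ then 0
  else
    let best := (PySem.List.pyRange l (h_ + 1) 1).foldl
      (fun best i =>
        let a := PySem.List.pyGetD arr i 0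
        innerB arr h_ i (i + 1) a a best) 1
    (h_ - l + 1) - best

-- ===== PRECONDITION & SPEC =====
-- Exactly the inputs on which Python A returns (no IndexError): either the
-- trivial window l ≥ h, or every index of arr[l..h] in range (Python indexing,
-- so l may be negative down to -len).
def Pre_minRemovals (arr : List Int) (l : Int) (h_ : Int) : Prop :=
  l ≥ h_ ∨ (-(arr.length : Int) ≤ l ∧ h_ < (arr.length : Int))
instance (arr : List Int) (l : Int) (h_ : Int) : Decidable (Pre_minRemovals arr l h_) := by
  unfold Pre_minRemovals; infer_instance

def pvWitness_minRemovals : List Int × Int × Int := ([3, 2, 3, 10], 0, 3)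

def Spec_minRemovals (arr : List Int) (l : Int) (h_ : Int) (out : Int) : Prop := out = minRemovals_alt arr l h_
instance (arr : List Int) (l : Int) (h_ : Int) (out : Int) : Decidable (Spec_minRemovals arr l h_ out) := by unfold Spec_minRemovals; infer_instance

-- ===== CLAIM (what is proved, stated in full; the proofs are below) =====
def Claim_equal_minRemovals : Prop := ∀ (arr : List Int) (l : Int) (h_ : Int), Dom_minRemovals arr l h_ → Pre_minRemovals arr l h_ → Spec_minRemovals arr l h_ (minRemovals arr l h_)

-- ===== LEMMAS AND PROOFS =====
-- Everything is proved for a generic index function f : Int → Int; the ports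
-- instantiate f := fun i => PySem.List.pyGetD arr i 0.

-- range minimum / maximum of f over [l..h], as structural recursions
def rmin (f : Int → Int) (l : Int) (h_ : Int) : Int :=
  if h : h_ ≤ l then f l else min (rmin f l (h_ - 1)) (f h_)
termination_by (h_ - l).toNat
decreasing_by omega

def rmax (f : Int → Int) (l : Int) (h_ : Int) : Int :=
  if h : h_ ≤ l then f l else max (rmax f l (h_ - 1)) (f h_)
termination_by (h_ - l).toNat
decreasing_by omega

def pvValid (f : Int → Int) (l : Int) (h_ : Int) : Prop :=
  2 * rmin f l h_ > rmax f l h_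

-- the length reached by the inner scan (window start i, next index j)
def ext (f : Int → Int) (h_ i j mn mx : Int) : Int :=
  if _h : j > h_ then j - i
  else if 2 * min mn (f j) > max mx (f j) then
    ext f h_ i (j + 1) (min mn (f j)) (max mx (f j))
  else j - i
termination_by (h_ + 1 - j).toNat
decreasing_by omega

-- best window length over starts i ∈ [l..h]
def bestS (f : Int → Int) (l : Int) (h_ : Int) : Int :=
  if h : h_ < l then 1
  else max (ext f h_ l (l + 1) (f l) (f l)) (bestS f (l + 1) h_)
termination_by (h_ + 1 - l).toNat
decreasing_by omega

theorem pyMini_eq (arr : List Int) (l h_ : Int) (hlh : l ≤ h_) :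
    pyMini arr l h_ = rmin (fun i => PySem.List.pyGetD arr i 0) l h_ := by
  obtain ⟨n, hn⟩ : ∃ n : ℕ, (h_ - l).toNat = n := ⟨_, rfl⟩
  induction n generalizing h_ with
  | zero =>
    have : h_ = l := by omega
    subst this
    rw [pyMini, PySem.List.pyRange_one_eq_nil (by omega), rmin, dif_pos (by omega)]
    rfl
  | succ n ih =>
    have hlt : l < h_ := by omega
    rw [pyMini, PySem.List.pyRange_one_succ_right (by omega : l + 1 ≤ h_),
      List.foldl_append,
      show PySem.List.pyRange (l + 1) h_ 1 = PySem.List.pyRange (l + 1) (h_ - 1 + 1) 1 by norm_num]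
    have hih := ih (h_ - 1) (by omega) (by omega)
    rw [pyMini] at hih
    rw [hih, show rmin (fun i => PySem.List.pyGetD arr i 0) l h_
        = min (rmin (fun i => PySem.List.pyGetD arr i 0) l (h_ - 1)) (PySem.List.pyGetD arr h_ 0) by
      rw [rmin, dif_neg (by omega : ¬ h_ ≤ l)]]
    simp only [List.foldl_cons, List.foldl_nil, min_def]
    split_ifs <;> omega

theorem pyMaxA_eq (arr : List Int) (l h_ : Int) (hlh : l ≤ h_) :
    pyMaxA arr l h_ = rmax (fun i => PySem.List.pyGetD arr i 0) l h_ := by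
  obtain ⟨n, hn⟩ : ∃ n : ℕ, (h_ - l).toNat = n := ⟨_, rfl⟩
  induction n generalizing h_ with
  | zero =>
    have : h_ = l := by omega
    subst this
    rw [pyMaxA, PySem.List.pyRange_one_eq_nil (by omega), rmax, dif_pos (by omega)]
    rfl
  | succ n ih =>
    have hlt : l < h_ := by omega
    rw [pyMaxA, PySem.List.pyRange_one_succ_right (by omega : l + 1 ≤ h_),
      List.foldl_append,
      show PySem.List.pyRange (l + 1) h_ 1 = PySem.List.pyRange (l + 1) (h_ - 1 + 1) 1 by norm_num]
    have hih := ih (h_ - 1) (by omega) (by omega)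
    rw [pyMaxA] at hih
    rw [hih, show rmax (fun i => PySem.List.pyGetD arr i 0) l h_
        = max (rmax (fun i => PySem.List.pyGetD arr i 0) l (h_ - 1)) (PySem.List.pyGetD arr h_ 0) by
      rw [rmax, dif_neg (by omega : ¬ h_ ≤ l)]]
    simp only [List.foldl_cons, List.foldl_nil, max_def]
    split_ifs <;> omega

theorem rmin_mono (f : Int → Int) (l j h_ : Int) (h1 : l ≤ j) (h2 : j ≤ h_) :
    rmin f l h_ ≤ rmin f l j := by
  obtain ⟨n, hn⟩ : ∃ n : ℕ, (h_ - j).toNat = n := ⟨_, rfl⟩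
  induction n generalizing h_ with
  | zero =>
    have : h_ = j := by omega
    subst this; exact le_rfl
  | succ n ih =>
    rw [rmin, dif_neg (by omega : ¬ h_ ≤ l)]
    exact le_trans (min_le_left _ _) (ih (h_ - 1) (by omega) (by omega))

theorem rmax_mono (f : Int → Int) (l j h_ : Int) (h1 : l ≤ j) (h2 : j ≤ h_) :
    rmax f l j ≤ rmax f l h_ := by
  obtain ⟨n, hn⟩ : ∃ n : ℕ, (h_ - j).toNat = n := ⟨_, rfl⟩
  induction n generalizing h_ with
  | zero =>
    have : h_ = j := by omega
    subst this; exact le_rfl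
  | succ n ih =>
    rw [show rmax f l h_ = max (rmax f l (h_-1)) (f h_) by
      rw [rmax, dif_neg (by omega : ¬ h_ ≤ l)]]
    exact le_trans (ih (h_ - 1) (by omega) (by omega)) (le_max_left _ _)

theorem valid_prefix (f : Int → Int) (l j h_ : Int) (h1 : l ≤ j) (h2 : j ≤ h_)
    (hv : pvValid f l h_) : pvValid f l j := by
  unfold pvValid at *
  have a1 := rmin_mono f l j h_ h1 h2
  have a2 := rmax_mono f l j h_ h1 h2
  omega

theorem ext_ge (f : Int → Int) (h_ i j mn mx : Int) :
    j - i ≤ ext f h_ i j mn mx := by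
  obtain ⟨n, hn⟩ : ∃ n : ℕ, (h_ + 1 - j).toNat = n := ⟨_, rfl⟩
  induction n generalizing j mn mx with
  | zero =>
    rw [ext, dif_pos (by omega : j > h_)]
  | succ n ih =>
    rw [ext, dif_neg (by omega : ¬ j > h_)]
    split
    · have := ih (j + 1) (min mn (f j)) (max mx (f j)) (by omega)
      omega
    · exact le_rfl

theorem ext_le (f : Int → Int) (h_ i j mn mx : Int) (hj : j ≤ h_ + 1) :
    ext f h_ i j mn mx ≤ h_ + 1 - i := by
  obtain ⟨n, hn⟩ : ∃ n : ℕ, (h_ + 1 - j).toNat = n := ⟨_, rfl⟩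
  induction n generalizing j mn mx with
  | zero =>
    rw [ext, dif_pos (by omega : j > h_)]
    omega
  | succ n ih =>
    rw [ext, dif_neg (by omega : ¬ j > h_)]
    split
    · exact ih (j + 1) (min mn (f j)) (max mx (f j)) (by omega) (by omega)
    · omega

theorem ext_full (f : Int → Int) (h_ i j : Int) (hij : i < j) (hj : j ≤ h_ + 1)
    (hv : pvValid f i h_) :
    ext f h_ i j (rmin f i (j - 1)) (rmax f i (j - 1)) = h_ + 1 - i := by
  obtain ⟨n, hn⟩ : ∃ n : ℕ, (h_ + 1 - j).toNat = n := ⟨_, rfl⟩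
  induction n generalizing j with
  | zero =>
    rw [ext, dif_pos (by omega : j > h_)]
    omega
  | succ n ih =>
    have hjh : j ≤ h_ := by omega
    have emn : min (rmin f i (j - 1)) (f j) = rmin f i j := by
      rw [show rmin f i j = min (rmin f i (j - 1)) (f j) by
        rw [rmin, dif_neg (by omega : ¬ j ≤ i)]]
    have emx : max (rmax f i (j - 1)) (f j) = rmax f i j := by
      rw [show rmax f i j = max (rmax f i (j - 1)) (f j) by
        rw [rmax, dif_neg (by omega : ¬ j ≤ i)]]
    have hvj : pvValid f i j := valid_prefix f i j h_ (by omega) hjh hv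
    rw [ext, dif_neg (by omega : ¬ j > h_), emn, emx,
      if_pos (by unfold pvValid at hvj; omega)]
    have := ih (j + 1) (by omega) (by omega) (by omega)
    simpa using this

theorem ext_reach (f : Int → Int) (h_ i j : Int) (hij : i < j) (hj : j ≤ h_ + 1)
    (he : ext f h_ i j (rmin f i (j - 1)) (rmax f i (j - 1)) = h_ + 1 - i) :
    h_ < j ∨ pvValid f i h_ := by
  obtain ⟨n, hn⟩ : ∃ n : ℕ, (h_ + 1 - j).toNat = n := ⟨_, rfl⟩
  induction n generalizing j with
  | zero => left; omega
  | succ n ih =>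
    have hjh : j ≤ h_ := by omega
    have emn : min (rmin f i (j - 1)) (f j) = rmin f i j := by
      rw [show rmin f i j = min (rmin f i (j - 1)) (f j) by
        rw [rmin, dif_neg (by omega : ¬ j ≤ i)]]
    have emx : max (rmax f i (j - 1)) (f j) = rmax f i j := by
      rw [show rmax f i j = max (rmax f i (j - 1)) (f j) by
        rw [rmax, dif_neg (by omega : ¬ j ≤ i)]]
    rw [ext, dif_neg (by omega : ¬ j > h_), emn, emx] at he
    by_cases hok : 2 * rmin f i j > rmax f i j
    · rw [if_pos hok] at he
      rcases eq_or_lt_of_le hjh with hjeq | hjlt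
      · right; subst hjeq; exact hok
      · have := ih (j + 1) (by omega) (by omega) (by simpa using he) (by omega)
        rcases this with h | h
        · right
          have : j = h_ := by omega
          subst this; exact hok
        · right; exact h
    · rw [if_neg hok] at he
      omega

theorem ext_mono_h (f : Int → Int) (h_ i j mn mx : Int) :
    ext f (h_ - 1) i j mn mx ≤ ext f h_ i j mn mx := by
  obtain ⟨n, hn⟩ : ∃ n : ℕ, (h_ + 1 - j).toNat = n := ⟨_, rfl⟩
  induction n generalizing j mn mx with
  | zero =>
    rw [ext, dif_pos (by omega : j > h_ - 1), ext, dif_pos (by omega : j > h_)]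
  | succ n ih =>
    by_cases hj1 : j > h_ - 1
    · rw [ext, dif_pos hj1]
      exact ext_ge f h_ i j mn mx
    · have g1 : ext f (h_ - 1) i j mn mx
          = if 2 * min mn (f j) > max mx (f j) then
              ext f (h_ - 1) i (j + 1) (min mn (f j)) (max mx (f j))
            else j - i := by
        rw [ext, dif_neg hj1]
      have g2 : ext f h_ i j mn mx
          = if 2 * min mn (f j) > max mx (f j) then
              ext f h_ i (j + 1) (min mn (f j)) (max mx (f j))
            else j - i := by
        rw [ext, dif_neg (by omega : ¬ j > h_)]
      rw [g1, g2]
      by_cases hok : 2 * min mn (f j) > max mx (f j)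
      · rw [if_pos hok, if_pos hok]
        exact ih (j + 1) _ _ (by omega)
      · rw [if_neg hok, if_neg hok]

theorem ext_trunc (f : Int → Int) (h_ i j mn mx : Int) (hj : j ≤ h_)
    (he : ext f h_ i j mn mx ≤ h_ - i) :
    ext f (h_ - 1) i j mn mx = ext f h_ i j mn mx := by
  obtain ⟨n, hn⟩ : ∃ n : ℕ, (h_ - j).toNat = n := ⟨_, rfl⟩
  induction n generalizing j mn mx with
  | zero =>
    have hjh : j = h_ := by omega
    have g1 : ext f (h_ - 1) i j mn mx = j - i := by
      rw [ext, dif_pos (by omega : j > h_ - 1)]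
    have g2 : ext f h_ i j mn mx
        = if 2 * min mn (f j) > max mx (f j) then
            ext f h_ i (j + 1) (min mn (f j)) (max mx (f j))
          else j - i := by
      rw [ext, dif_neg (by omega : ¬ j > h_)]
    by_cases hok : 2 * min mn (f j) > max mx (f j)
    · exfalso
      rw [g2, if_pos hok] at he
      rw [ext, dif_pos (by omega : j + 1 > h_)] at he
      omega
    · rw [g1, g2, if_neg hok]
  | succ n ih =>
    have g1 : ext f (h_ - 1) i j mn mx
        = if 2 * min mn (f j) > max mx (f j) then
            ext f (h_ - 1) i (j + 1) (min mn (f j)) (max mx (f j))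
          else j - i := by
      rw [ext, dif_neg (by omega : ¬ j > h_ - 1)]
    have g2 : ext f h_ i j mn mx
        = if 2 * min mn (f j) > max mx (f j) then
            ext f h_ i (j + 1) (min mn (f j)) (max mx (f j))
          else j - i := by
      rw [ext, dif_neg (by omega : ¬ j > h_)]
    rw [g2] at he
    by_cases hok : 2 * min mn (f j) > max mx (f j)
    · rw [if_pos hok] at he
      rw [g1, g2, if_pos hok, if_pos hok]
      exact ih (j + 1) _ _ (by omega) he (by omega)
    · rw [g1, g2, if_neg hok, if_neg hok]

theorem bestS_ge_one (f : Int → Int) (l h_ : Int) : 1 ≤ bestS f l h_ := by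
  obtain ⟨n, hn⟩ : ∃ n : ℕ, (h_ + 1 - l).toNat = n := ⟨_, rfl⟩
  induction n generalizing l with
  | zero => rw [bestS, dif_pos (by omega : h_ < l)]
  | succ n ih =>
    rw [bestS, dif_neg (by omega : ¬ h_ < l)]
    exact le_trans (ih (l + 1) (by omega)) (le_max_right _ _)

theorem bestS_le (f : Int → Int) (l h_ : Int) (hlh : l ≤ h_) :
    bestS f l h_ ≤ h_ + 1 - l := by
  obtain ⟨n, hn⟩ : ∃ n : ℕ, (h_ + 1 - l).toNat = n := ⟨_, rfl⟩
  induction n generalizing l with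
  | zero => omega
  | succ n ih =>
    rw [bestS, dif_neg (by omega : ¬ h_ < l)]
    have e1 := ext_le f h_ l (l + 1) (f l) (f l) (by omega)
    have e2 : bestS f (l + 1) h_ ≤ h_ + 1 - l := by
      by_cases hc : l + 1 ≤ h_
      · have := ih (l + 1) hc (by omega); omega
      · rw [bestS, dif_pos (by omega : h_ < l + 1)]; omega
    omega

theorem rmin_self (f : Int → Int) (l : Int) : rmin f l (l + 1 - 1) = f l := by
  rw [show l + 1 - 1 = l by ring, rmin, dif_pos le_rfl]

theorem rmax_self (f : Int → Int) (l : Int) : rmax f l (l + 1 - 1) = f l := by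
  rw [show l + 1 - 1 = l by ring, rmax, dif_pos le_rfl]

theorem bestS_valid (f : Int → Int) (l h_ : Int) (hlh : l ≤ h_) (hv : pvValid f l h_) :
    bestS f l h_ = h_ + 1 - l := by
  rw [bestS, dif_neg (by omega : ¬ h_ < l)]
  have e := ext_full f h_ l (l + 1) (by omega) (by omega) hv
  rw [rmin_self, rmax_self] at e
  have hb : bestS f (l + 1) h_ ≤ h_ + 1 - l := by
    by_cases hc : l + 1 ≤ h_
    · have := bestS_le f (l + 1) h_ hc; omega
    · rw [bestS, dif_pos (by omega : h_ < l + 1)]; omega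
  rw [e]
  omega

theorem bestS_mono_h (f : Int → Int) (l h_ : Int) (hlh : l ≤ h_) :
    bestS f l (h_ - 1) ≤ bestS f l h_ := by
  obtain ⟨n, hn⟩ : ∃ n : ℕ, (h_ + 1 - l).toNat = n := ⟨_, rfl⟩
  induction n generalizing l with
  | zero => omega
  | succ n ih =>
    by_cases hc : h_ - 1 < l
    · rw [bestS, dif_pos hc]
      exact bestS_ge_one f l h_
    · have g2 : bestS f l h_ = max (ext f h_ l (l + 1) (f l) (f l)) (bestS f (l + 1) h_) := by
        rw [bestS, dif_neg (by omega : ¬ h_ < l)]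
      rw [bestS, dif_neg hc, g2]
      have e1 := ext_mono_h f h_ l (l + 1) (f l) (f l)
      have e2 := ih (l + 1) (by omega) (by omega)
      omega

theorem bestS_rec (f : Int → Int) (l h_ : Int) (hlh : l < h_) (hv : ¬ pvValid f l h_) :
    bestS f l h_ = max (bestS f (l + 1) h_) (bestS f l (h_ - 1)) := by
  have g1 : bestS f l h_ = max (ext f h_ l (l + 1) (f l) (f l)) (bestS f (l + 1) h_) := by
    rw [bestS, dif_neg (by omega : ¬ h_ < l)]
  have g2 : bestS f l (h_ - 1)
      = max (ext f (h_ - 1) l (l + 1) (f l) (f l)) (bestS f (l + 1) (h_ - 1)) := by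
    rw [bestS, dif_neg (by omega : ¬ h_ - 1 < l)]
  have hne : ext f h_ l (l + 1) (f l) (f l) ≠ h_ + 1 - l := by
    intro heq
    have hre : ext f h_ l (l + 1) (rmin f l (l + 1 - 1)) (rmax f l (l + 1 - 1)) = h_ + 1 - l := by
      rw [rmin_self, rmax_self]; exact heq
    rcases ext_reach f h_ l (l + 1) (by omega) (by omega) hre with h | h
    · omega
    · exact hv h
  have hle := ext_le f h_ l (l + 1) (f l) (f l) (by omega)
  have htr : ext f (h_ - 1) l (l + 1) (f l) (f l) = ext f h_ l (l + 1) (f l) (f l) :=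
    ext_trunc f h_ l (l + 1) (f l) (f l) (by omega) (by omega)
  have hmono := bestS_mono_h f l h_ (by omega)
  rw [g1] at hmono ⊢
  rw [g2] at hmono ⊢
  omega

theorem innerB_eq (arr : List Int) (h_ i j mn mx best : Int) (hb : j - i ≤ best) :
    innerB arr h_ i j mn mx best
      = max best (ext (fun k => PySem.List.pyGetD arr k 0) h_ i j mn mx) := by
  obtain ⟨n, hn⟩ : ∃ n : ℕ, (h_ + 1 - j).toNat = n := ⟨_, rfl⟩
  induction n generalizing j mn mx best with
  | zero =>
    rw [innerB, dif_pos (by omega : j > h_), ext, dif_pos (by omega : j > h_)]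
    omega
  | succ n ih =>
    have hjle : ¬ j > h_ := by omega
    have m1 : (if PySem.List.pyGetD arr j 0 < mn then PySem.List.pyGetD arr j 0 else mn)
        = min mn (PySem.List.pyGetD arr j 0) := by
      rw [min_def]; split_ifs <;> omega
    have m2 : (if PySem.List.pyGetD arr j 0 > mx then PySem.List.pyGetD arr j 0 else mx)
        = max mx (PySem.List.pyGetD arr j 0) := by
      rw [max_def]; split_ifs <;> omega
    rw [innerB, dif_neg hjle, ext, dif_neg hjle]
    simp only [m1, m2]
    by_cases hok : 2 * min mn (PySem.List.pyGetD arr j 0) > max mx (PySem.List.pyGetD arr j 0)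
    · rw [if_pos hok, if_pos hok]
      rw [ih (j + 1) _ _ _ (by split_ifs <;> omega) (by omega)]
      have hge := ext_ge (fun k => PySem.List.pyGetD arr k 0) h_ i (j + 1)
        (min mn (PySem.List.pyGetD arr j 0)) (max mx (PySem.List.pyGetD arr j 0))
      simp only [show (if j - i + 1 > best then j - i + 1 else best) = max best (j - i + 1) by
        split_ifs <;> omega]
      omega
    · rw [if_neg hok, if_neg hok]
      omega

theorem foldB_eq (arr : List Int) (h_ : Int) (l : Int) (c : Int) (hl : l ≤ h_ + 1)
    (hc : 1 ≤ c) :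
    (PySem.List.pyRange l (h_ + 1) 1).foldl
      (fun best i =>
        let a := PySem.List.pyGetD arr i 0
        innerB arr h_ i (i + 1) a a best) c
      = max c (bestS (fun k => PySem.List.pyGetD arr k 0) l h_) := by
  obtain ⟨n, hn⟩ : ∃ n : ℕ, (h_ + 1 - l).toNat = n := ⟨_, rfl⟩
  induction n generalizing l c with
  | zero =>
    rw [PySem.List.pyRange_one_eq_nil (by omega : h_ + 1 ≤ l), bestS, dif_pos (by omega : h_ < l)]
    simp only [List.foldl_nil]
    omega
  | succ n ih =>
    rw [PySem.List.pyRange_one_cons (by omega : l < h_ + 1)]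
    simp only [List.foldl_cons]
    rw [innerB_eq arr h_ l (l + 1) (PySem.List.pyGetD arr l 0) (PySem.List.pyGetD arr l 0) c
      (by omega)]
    rw [ih (l + 1) _ (by omega) (by omega) (by omega)]
    rw [show bestS (fun k => PySem.List.pyGetD arr k 0) l h_
        = max (ext (fun k => PySem.List.pyGetD arr k 0) h_ l (l + 1)
            (PySem.List.pyGetD arr l 0) (PySem.List.pyGetD arr l 0))
            (bestS (fun k => PySem.List.pyGetD arr k 0) (l + 1) h_) by
      rw [bestS, dif_neg (by omega : ¬ h_ < l)]]
    omega

theorem minRemovals_eq (arr : List Int) (l h_ : Int) (hlh : l ≤ h_) :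
    minRemovals arr l h_
      = (h_ + 1 - l) - bestS (fun k => PySem.List.pyGetD arr k 0) l h_ := by
  obtain ⟨n, hn⟩ : ∃ n : ℕ, (h_ - l).toNat = n := ⟨_, rfl⟩
  induction n generalizing l h_ with
  | zero =>
    have hq : l = h_ := by omega
    rw [minRemovals, dif_pos (by omega : l ≥ h_)]
    have b1 := bestS_ge_one (fun k => PySem.List.pyGetD arr k 0) l h_
    have b2 := bestS_le (fun k => PySem.List.pyGetD arr k 0) l h_ hlh
    omega
  | succ n ih =>
    have hlt : l < h_ := by omega
    rw [minRemovals, dif_neg (by omega : ¬ l ≥ h_)]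
    simp only [pyMini_eq arr l h_ (by omega), pyMaxA_eq arr l h_ (by omega)]
    by_cases hv : pvValid (fun k => PySem.List.pyGetD arr k 0) l h_
    · rw [if_pos (show 2 * rmin (fun i => PySem.List.pyGetD arr i 0) l h_
          > rmax (fun i => PySem.List.pyGetD arr i 0) l h_ from hv),
        bestS_valid (fun k => PySem.List.pyGetD arr k 0) l h_ hlh hv]
      omega
    · rw [if_neg (show ¬ 2 * rmin (fun i => PySem.List.pyGetD arr i 0) l h_
          > rmax (fun i => PySem.List.pyGetD arr i 0) l h_ from hv)]
      rw [ih (l + 1) h_ (by omega) (by omega), ih l (h_ - 1) (by omega) (by omega)]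
      rw [bestS_rec (fun k => PySem.List.pyGetD arr k 0) l h_ hlt hv]
      omega

-- ===== VERDICT (by name: the statement is the Claim_ definition above) =====
theorem minRemovals_spec : Claim_equal_minRemovals := by
  intro arr l h_ _ _
  unfold Spec_minRemovals
  by_cases hl : l ≥ h_
  · unfold minRemovals minRemovals_alt
    simp [hl]
  · have hlh : l ≤ h_ := le_of_not_ge fun h => hl h
    have hlt : l < h_ := lt_of_le_of_ne hlh (by rintro rfl; exact hl le_rfl)
    unfold minRemovals_alt
    rw [if_neg hl, foldB_eq arr h_ l 1 (by omega) le_rfl,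
      minRemovals_eq arr l h_ hlh]
    have h1 := bestS_ge_one (fun k => PySem.List.pyGetD arr k 0) l h_
    simp only [max_eq_right h1]
    omega
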